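-- pv_equiv track=rewrite | github.com/chirsz-ever/aoc | 2023/12/ans2.py | prefix_may_match
-- ===== SOURCE A (Python) =====
-- def prefix_may_match(gs: tuple[int,...], rec1: str) -> bool:
--     if len(gs) == 0:
--         return '#' not in rec1
--     assert gs[0] != 0
--     gi = 0
--     ri = 0
--     gc = 0
--     while ri < len(rec1):
--         if rec1[ri] == '?':
--             return gi < len(gs) and gc <= gs[gi] or gi == len(gs) and gc == 0 and '#' not in rec1[ri:]
--         elif rec1[ri] == '.':
--             if gc > 0:
--                 if gi < len(gs) and gs[gi] == gc:
--                     gc = 0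
--                     gi += 1
--                 else:
--                     return False
--         elif rec1[ri] == '#':
--             gc += 1
--         ri += 1
--     return (rec1[-1] == '.' and gi == len(gs)) or (gi == len(gs) - 1 and gs[gi] == gc)
-- ===== SOURCE B (Python) =====
-- def prefix_may_match(gs, rec1):
--     # Parse the determined prefix (up to the first '?') into completed runs,
--     # then check it against gs in one shot.
--     if len(gs) == 0:
--         return '#' not in rec1
--     assert gs[0] != 0
--     sig = [c for c in rec1 if c in '#.?']
--     q = next((i for i, c in enumerate(sig) if c == '?'), len(sig))
--     det = sig[:q]
--     segs = ''.join(det).split('.')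
--     tail_run = len(segs[-1])
--     completed = [len(s) for s in segs[:-1] if s]
--     ndone = len(completed)
--     if ndone > len(gs) or completed != list(gs[:ndone]):
--         return False
--     if q < len(sig):
--         return (ndone < len(gs) and tail_run <= gs[ndone]) or \
--                (ndone == len(gs) and tail_run == 0 and '#' not in sig[q:])
--     return (rec1[-1] == '.' and ndone == len(gs)) or (ndone == len(gs) - 1 and gs[ndone] == tail_run)
-- ===== Notes on version B (the rewrite author's own statement) =====
-- stated objective: simpler
-- what changed: Replaces A's character-by-character state machine (while loop with mutable group-index/run-length state and per-character branching) by a parse-then-check decomposition: split the determined prefix (up to the first '?') on '.' into completed run lengths, compare them with gs in one shot, then apply the '?' / end-of-string condition directly.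
import Mathlib
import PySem

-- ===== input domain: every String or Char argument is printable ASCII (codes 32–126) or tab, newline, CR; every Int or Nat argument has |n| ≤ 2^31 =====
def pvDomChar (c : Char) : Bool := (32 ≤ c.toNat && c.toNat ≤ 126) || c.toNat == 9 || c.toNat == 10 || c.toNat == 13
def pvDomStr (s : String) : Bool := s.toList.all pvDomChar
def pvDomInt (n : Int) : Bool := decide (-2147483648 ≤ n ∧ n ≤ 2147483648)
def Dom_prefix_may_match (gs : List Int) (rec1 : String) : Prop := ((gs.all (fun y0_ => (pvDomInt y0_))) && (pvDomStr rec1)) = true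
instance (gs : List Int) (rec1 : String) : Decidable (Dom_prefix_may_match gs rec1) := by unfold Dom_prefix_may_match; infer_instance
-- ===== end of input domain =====

-- B replaces A's character-by-character state machine by a parse-then-check
-- decomposition: split the determined prefix into completed run lengths and
-- compare them with gs in one shot (objective: simpler; equal value everywhere A returns).

-- ===== PORT A =====
-- A's while loop: cs is the rest of the record, gi/gc the group index / current run length.
def pmmLoop (gs : List Int) (rec1 : String) (gi gc : Nat) : List Char → Bool
  | [] =>
      ((PySem.List.pyGet? rec1.toList (-1) == some '.') && decide (gi = gs.length))
      || (decide ((gi : Int) = (gs.length : Int) - 1) && (gs[gi]?.getD 0 == (gc : Int)))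
  | c :: rest =>
      if c = '?' then
        (decide (gi < gs.length) && decide ((gc : Int) ≤ gs[gi]?.getD 0))
        || (decide (gi = gs.length) && decide (gc = 0) && !((c :: rest).contains '#'))
      else if c = '.' then
        (if 0 < gc then
          (if decide (gi < gs.length) && (gs[gi]? == some (gc : Int)) then
            pmmLoop gs rec1 (gi + 1) 0 rest
          else false)
        else pmmLoop gs rec1 gi gc rest)
      else if c = '#' then pmmLoop gs rec1 gi (gc + 1) rest
      else pmmLoop gs rec1 gi gc rest

def prefix_may_match (gs : List Int) (rec1 : String) : Bool :=
  if gs.length = 0 then !(rec1.toList.contains '#')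
  else pmmLoop gs rec1 0 0 rec1.toList

-- ===== PORT B =====
def prefix_may_match_alt (gs : List Int) (rec1 : String) : Bool :=
  if gs.length = 0 then !(rec1.toList.contains '#')
  else
    let sig := rec1.toList.filter (fun c => c = '#' || c = '.' || c = '?')
    let q := (sig.findIdx? (fun c => c = '?')).getD sig.length
    let det := sig.take q
    let segs := det.splitOn '.'
    let gc := (segs.getLast?.getD []).length
    let completed := (segs.dropLast.filter (fun s => s ≠ [])).map (fun s => (s.length : Int))
    let gi := completed.length
    if decide (gs.length < gi) || decide (completed ≠ gs.take gi) then false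
    else if q < sig.length then
      (decide (gi < gs.length) && decide ((gc : Int) ≤ gs[gi]?.getD 0))
      || (decide (gi = gs.length) && decide (gc = 0) && !((sig.drop q).contains '#'))
    else
      ((PySem.List.pyGet? rec1.toList (-1) == some '.') && decide (gi = gs.length))
      || (decide ((gi : Int) = (gs.length : Int) - 1) && (gs[gi]?.getD 0 == (gc : Int)))

-- ===== PRECONDITION & SPEC =====
-- Pre_ excludes exactly the inputs where A raises: AssertionError when gs[0] == 0,
-- and IndexError (rec1[-1]) when rec1 is empty and gs is non-empty.
def Pre_prefix_may_match (gs : List Int) (rec1 : String) : Prop :=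
  gs = [] ∨ (gs.headD 0 ≠ 0 ∧ rec1 ≠ "")
instance (gs : List Int) (rec1 : String) : Decidable (Pre_prefix_may_match gs rec1) := by
  unfold Pre_prefix_may_match; infer_instance
def pvWitness_prefix_may_match : List Int × String := ([1], "#?")

def Spec_prefix_may_match (gs : List Int) (rec1 : String) (out : Bool) : Prop := out = prefix_may_match_alt gs rec1
instance (gs : List Int) (rec1 : String) (out : Bool) : Decidable (Spec_prefix_may_match gs rec1 out) := by unfold Spec_prefix_may_match; infer_instance

-- ===== CLAIM (what is proved, stated in full; the proofs are below) =====
def Claim_equal_prefix_may_match : Prop := ∀ (gs : List Int) (rec1 : String), Dom_prefix_may_match gs rec1 → Pre_prefix_may_match gs rec1 → Spec_prefix_may_match gs rec1 (prefix_may_match gs rec1)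

-- ===== LEMMAS AND PROOFS =====

-- proof-only helpers: a generalized form of B's computation, relative to loop state (gi, gc)

def pvSigp (c : Char) : Bool := c = '#' || c = '.' || c = '?'

def pvQ (sig : List Char) : Nat := (sig.findIdx? (fun c => c = '?')).getD sig.length

-- (completed run lengths, trailing run length) of (replicate gc '#' ++ X)
def pvSplit (gc : Nat) (X : List Char) : List Int × Nat :=
  let segs := (List.replicate gc '#' ++ X).splitOn '.'
  ((segs.dropLast.filter (fun s => s ≠ [])).map (fun s => (s.length : Int)),
   (segs.getLast?.getD []).length)

def pvCheck (gs : List Int) (rec1 : String) (gi : Nat) (completed : List Int) (gcT : Nat)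
    (hasQ tailHash : Bool) : Bool :=
  let gi' := gi + completed.length
  if decide (gs.length < gi') || decide (completed ≠ (gs.drop gi).take completed.length) then false
  else if hasQ then
    (decide (gi' < gs.length) && decide ((gcT : Int) ≤ gs[gi']?.getD 0))
    || (decide (gi' = gs.length) && decide (gcT = 0) && !tailHash)
  else
    ((PySem.List.pyGet? rec1.toList (-1) == some '.') && decide (gi' = gs.length))
    || (decide ((gi' : Int) = (gs.length : Int) - 1) && (gs[gi']?.getD 0 == (gcT : Int)))

def pmmRef (gs : List Int) (rec1 : String) (gi gc : Nat) (cs : List Char) : Bool :=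
  let sig := cs.filter pvSigp
  let q := pvQ sig
  pvCheck gs rec1 gi (pvSplit gc (sig.take q)).1 (pvSplit gc (sig.take q)).2
    (decide (q < sig.length)) ((sig.drop q).contains '#')

-- pvQ facts
theorem pvQ_nil : pvQ [] = 0 := rfl

theorem pvQ_quest (sig : List Char) : pvQ ('?' :: sig) = 0 := by
  simp [pvQ, List.findIdx?_cons]

theorem pvQ_cons (c : Char) (sig : List Char) (h : c ≠ '?') : pvQ (c :: sig) = pvQ sig + 1 := by
  simp only [pvQ, List.findIdx?_cons, h, decide_false]
  cases hf : sig.findIdx? (fun c => decide (c = '?')) <;> simp [List.length_cons]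

-- splitOn facts
theorem splitOnP_no_sep (p : Char → Bool) (xs : List Char) (h : ∀ a ∈ xs, p a = false) :
    xs.splitOnP p = [xs] := by
  induction xs with
  | nil => rfl
  | cons x xs ih =>
    have hx : p x = false := h x (by simp)
    rw [List.splitOnP_cons, hx]
    simp only [ih (fun a ha => h a (by simp [ha]))]
    rfl

theorem splitOnP_append_no_sep (p : Char → Bool) (xs ys : List Char)
    (h : ∀ a ∈ xs, p a = false) :
    (xs ++ ys).splitOnP p = List.modifyHead (xs ++ ·) (ys.splitOnP p) := by
  induction xs with
  | nil =>
    simp only [List.nil_append]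
    cases hys : ys.splitOnP p <;> simp [hys]
  | cons x xs ih =>
    have hx : p x = false := h x (by simp)
    rw [List.cons_append, List.splitOnP_cons, hx]
    simp only [ih (fun a ha => h a (by simp [ha]))]
    cases hys : ys.splitOnP p <;> simp

theorem replicate_no_dot (gc : Nat) : ∀ a ∈ List.replicate gc '#', (a == '.') = false := by
  intro a ha
  simp [List.eq_of_mem_replicate ha]

theorem splitOnP_ne_nil' (p : Char → Bool) (xs : List Char) : xs.splitOnP p ≠ [] := by
  induction xs with
  | nil => simp [List.splitOnP_nil]
  | cons x xs ih =>
    rw [List.splitOnP_cons]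
    split
    · simp
    · cases h : xs.splitOnP p
      · exact absurd h ih
      · simp [h]

-- pvSplit step lemmas
theorem pvSplit_nil (gc : Nat) : pvSplit gc [] = ([], gc) := by
  simp only [pvSplit, List.append_nil, List.splitOn]
  rw [splitOnP_no_sep _ _ (replicate_no_dot gc)]
  simp

theorem pvSplit_hash (gc : Nat) (X : List Char) : pvSplit gc ('#' :: X) = pvSplit (gc + 1) X := by
  simp only [pvSplit]
  have : List.replicate gc '#' ++ '#' :: X = List.replicate (gc + 1) '#' ++ X := by
    rw [List.replicate_succ']
    simp
  rw [this]

theorem pvSplit_dot (gc : Nat) (X : List Char) :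
    pvSplit gc ('.' :: X) =
      ((if 0 < gc then ((gc : Int)) :: (pvSplit 0 X).1 else (pvSplit 0 X).1), (pvSplit 0 X).2) := by
  simp only [pvSplit, List.splitOn, List.replicate_zero, List.nil_append]
  rw [splitOnP_append_no_sep _ _ _ (replicate_no_dot gc), List.splitOnP_cons]
  simp only [show (('.' : Char) == '.') = true from rfl, if_true]
  cases hX : X.splitOnP (fun x => x == '.') with
  | nil => exact absurd hX (splitOnP_ne_nil' _ _)
  | cons s ss =>
    simp only [List.modifyHead_cons, List.append_nil, Prod.mk.injEq]
    refine ⟨?_, by cases ss <;> simp⟩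
    by_cases hgc : 0 < gc
    · have hne : List.replicate gc '#' ≠ [] := by
        simp only [ne_eq, List.replicate_eq_nil_iff]
        omega
      cases ss <;> simp [List.dropLast_cons₂, List.filter_cons, hne, hgc]
    · have h0 : gc = 0 := by omega
      subst h0
      cases ss <;> simp [List.dropLast_cons₂, List.filter_cons]

-- pvCheck absorbs a completed group
theorem pvCheck_close (gs : List Int) (rec1 : String) (gi gc : Nat) (comp : List Int)
    (gcT : Nat) (hq th : Bool) (hgi : gi ≤ gs.length) (hgc : 0 < gc) :
    pvCheck gs rec1 gi ((gc : Int) :: comp) gcT hq th =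
      (if decide (gi < gs.length) && (gs[gi]? == some (gc : Int)) then
        pvCheck gs rec1 (gi + 1) comp gcT hq th
      else false) := by
  by_cases h1 : gi < gs.length
  · have hget : gs[gi]? = some gs[gi] := List.getElem?_eq_getElem h1
    have hdrop : gs.drop gi = gs[gi] :: gs.drop (gi + 1) := List.drop_eq_getElem_cons h1
    by_cases h2 : gs[gi] = (gc : Int)
    · have e : gi + (comp.length + 1) = gi + 1 + comp.length := by omega
      have hcond : (decide (gs.length < gi + (((gc : Int) :: comp).length))
            || decide (((gc : Int) :: comp) ≠ (gs.drop gi).take (((gc : Int) :: comp).length)))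
          = (decide (gs.length < gi + 1 + comp.length)
            || decide (comp ≠ (gs.drop (gi + 1)).take comp.length)) := by
        rw [List.length_cons, hdrop, List.take_succ_cons]
        congr 1
        · simp only [decide_eq_decide]
          omega
        · simp [h2]
      simp only [pvCheck]
      rw [hcond]
      simp only [List.length_cons, e, h1, hget, h2, decide_true, Bool.true_and,
        beq_self_eq_true, if_true]
    · have hcl : (decide (gi < gs.length) && (gs[gi]? == some (gc : Int))) = false := by
        simp [hget, h2]
      have hne : (((gc : Int) :: comp) ≠ (gs.drop gi).take (((gc : Int) :: comp).length)) := by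
        rw [hdrop, List.length_cons, List.take_succ_cons]
        intro hcontra
        injection hcontra with hx hy
        exact h2 hx.symm
      have hcond : (decide (gs.length < gi + (((gc : Int) :: comp).length))
          || decide (((gc : Int) :: comp) ≠ (gs.drop gi).take (((gc : Int) :: comp).length))) = true := by
        simp only [Bool.or_eq_true, decide_eq_true_eq]
        exact Or.inr (by simpa using hne)
      simp only [pvCheck]
      rw [hcond]
      simp [hcl]
  · have hcl : (decide (gi < gs.length) && (gs[gi]? == some (gc : Int))) = false := by
      simp [h1]
    have hlt : gs.length < gi + (((gc : Int) :: comp).length) := by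
      simp only [List.length_cons]
      omega
    have hcond : (decide (gs.length < gi + (((gc : Int) :: comp).length))
        || decide (((gc : Int) :: comp) ≠ (gs.drop gi).take (((gc : Int) :: comp).length))) = true := by
      simp only [Bool.or_eq_true, decide_eq_true_eq]
      exact Or.inl hlt
    simp only [pvCheck]
    rw [hcond]
    simp [hcl]

-- '#' is preserved by the filter
theorem contains_hash_filter (cs : List Char) : (cs.filter pvSigp).contains '#' = cs.contains '#' := by
  simp only [List.contains_eq_mem, eq_iff_iff, decide_eq_decide, List.mem_filter]
  simp [pvSigp]

-- the main loop lemma: A's loop equals the generalized B computation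
theorem pmmLoop_eq_ref (gs : List Int) (rec1 : String) :
    ∀ (cs : List Char) (gi gc : Nat), gi ≤ gs.length →
      pmmLoop gs rec1 gi gc cs = pmmRef gs rec1 gi gc cs := by
  intro cs
  induction cs with
  | nil =>
    intro gi gc hgi
    simp only [pmmLoop, pmmRef, List.filter_nil, pvQ_nil, List.take_nil, pvSplit_nil,
      List.length_nil, List.drop_nil, List.contains_eq_mem]
    simp only [pvCheck, List.length_nil, Nat.add_zero, List.take_zero]
    have h1 : ¬ gs.length < gi := by omega
    simp [h1]
    rfl
  | cons c cs ih =>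
    intro gi gc hgi
    by_cases hq : c = '?'
    · subst hq
      have hsig : ('?' :: cs).filter pvSigp = '?' :: cs.filter pvSigp := by
        simp [List.filter_cons, pvSigp]
      simp only [pmmLoop, if_true, pmmRef, hsig, pvQ_quest, List.take_zero, pvSplit_nil,
        List.drop_zero]
      simp only [pvCheck, List.length_nil, Nat.add_zero, List.take_zero]
      have h1 : ¬ gs.length < gi := by omega
      have hlen : (0 < ('?' :: cs.filter pvSigp).length) := by simp
      have hcont : (('?' :: cs.filter pvSigp).contains '#') = ((('?' : Char) :: cs).contains '#') := by
        simp only [List.contains_cons]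
        have : (('#' : Char) == '?') = false := by decide
        rw [contains_hash_filter]
      simp [h1, pvSigp]
      rfl
    · by_cases hd : c = '.'
      · subst hd
        have hsig : (('.' : Char) :: cs).filter pvSigp = '.' :: cs.filter pvSigp := by
          simp [List.filter_cons, pvSigp]
        have hqv : pvQ ('.' :: cs.filter pvSigp) = pvQ (cs.filter pvSigp) + 1 :=
          pvQ_cons _ _ (by decide)
        simp only [pmmLoop, if_false, if_true, show (('.' : Char) = '?') = False by simp, pmmRef,
          hsig, hqv, List.take_succ_cons, pvSplit_dot, List.drop_succ_cons]
        by_cases hgc : 0 < gc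
        · simp only [hgc, if_true]
          rw [pvCheck_close gs rec1 gi gc _ _ _ _ hgi hgc]
          by_cases hcl : decide (gi < gs.length) && (gs[gi]? == some (gc : Int))
          · have hgi' : gi + 1 ≤ gs.length := by
              simp only [Bool.and_eq_true, decide_eq_true_eq] at hcl
              omega
            simp only [hcl, if_true]
            rw [ih (gi + 1) 0 hgi']
            simp only [pmmRef]
            congr 1 <;> simp [hsig, hqv]
          · simp only [hcl, Bool.false_eq_true, if_false]
        · have hgc0 : gc = 0 := by omega
          subst hgc0
          simp only [Nat.lt_irrefl, if_false]
          rw [ih gi 0 hgi]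
          simp only [pmmRef]
          congr 1 <;> simp [hsig, hqv]
      · by_cases hh : c = '#'
        · subst hh
          have hsig : (('#' : Char) :: cs).filter pvSigp = '#' :: cs.filter pvSigp := by
            simp [List.filter_cons, pvSigp]
          have hqv : pvQ ('#' :: cs.filter pvSigp) = pvQ (cs.filter pvSigp) + 1 :=
            pvQ_cons _ _ (by decide)
          simp only [pmmLoop, show (('#' : Char) = '?') = False by simp,
            show (('#' : Char) = '.') = False by simp, if_false, if_true]
          rw [ih gi (gc + 1) hgi]
          simp only [pmmRef, hsig, hqv, List.take_succ_cons, pvSplit_hash, List.drop_succ_cons]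
          congr 1 <;> simp
        · by_cases hpm : pvSigp c
          · exfalso
            simp only [pvSigp, Bool.or_eq_true, decide_eq_true_eq] at hpm
            rcases hpm with (h | h) | h <;> [exact hh h; exact hd h; exact hq h]
          · have hsig : (c :: cs).filter pvSigp = cs.filter pvSigp := by
              simp [List.filter_cons, hpm]
            simp only [pmmLoop, hq, hd, hh, if_false]
            rw [ih gi gc hgi]
            simp only [pmmRef, hsig]

-- B's filter predicate is pvSigp
theorem filter_sig_eq (cs : List Char) :
    cs.filter (fun c => c = '#' || c = '.' || c = '?') = cs.filter pvSigp := rfl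

-- B's top-level else-branch is pmmRef at the initial state
theorem alt_eq_ref (gs : List Int) (rec1 : String) (h : ¬ gs.length = 0) :
    prefix_may_match_alt gs rec1 = pmmRef gs rec1 0 0 rec1.toList := by
  simp only [prefix_may_match_alt, h, if_false, filter_sig_eq, pmmRef, pvSplit, pvQ, pvCheck,
    List.replicate_zero, List.nil_append, List.drop_zero, Nat.zero_add, decide_eq_true_eq]
  rfl

-- ===== VERDICT (by name: the statement is the Claim_ definition above) =====
theorem prefix_may_match_spec : Claim_equal_prefix_may_match := by
  intro gs rec1 _ _
  unfold Spec_prefix_may_match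
  by_cases h : gs.length = 0
  · simp [prefix_may_match, prefix_may_match_alt, h]
  · rw [alt_eq_ref gs rec1 h]
    simp only [prefix_may_match, h, if_false]
    exact pmmLoop_eq_ref gs rec1 rec1.toList 0 0 (by omega)
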